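-- pv_equiv track=rewrite | github.com/Stanis4/qa_course | lesson_9/lesson_9.py | custom_range_generator
-- ===== SOURCE A (Python) =====
-- def custom_range_generator(start: int = 0, stop: int = 1, step: int = 1):
--     if step == 0:
--         raise ValueError("Zero step is not possible")
--     value = start
--
--     if start < stop and step > 0:
--         while value < stop:
--             yield value
--             value += step
--     elif start > stop and step < 0:
--         while value > stop:
--             yield value
--             value += step
--     else:
--         raise ValueError("Unacceptable values are entered")
-- ===== SOURCE B (Python) =====
-- def custom_range_generator(start: int = 0, stop: int = 1, step: int = 1):
--     if step == 0:
--         raise ValueError("Zero step is not possible")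
--     if not ((start < stop and step > 0) or (start > stop and step < 0)):
--         raise ValueError("Unacceptable values are entered")
--     n = -((start - stop) // step)  # ceil division: number of emitted values
--     for i in range(n):
--         yield start + step * i
-- ===== Notes on version B (the rewrite author's own statement) =====
-- stated objective: alternative
-- what changed: Replaces A's two direction-specific while loops with a running accumulator by one precomputed element count via ceiling division and a single index loop yielding start + step*i.
import Mathlib
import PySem

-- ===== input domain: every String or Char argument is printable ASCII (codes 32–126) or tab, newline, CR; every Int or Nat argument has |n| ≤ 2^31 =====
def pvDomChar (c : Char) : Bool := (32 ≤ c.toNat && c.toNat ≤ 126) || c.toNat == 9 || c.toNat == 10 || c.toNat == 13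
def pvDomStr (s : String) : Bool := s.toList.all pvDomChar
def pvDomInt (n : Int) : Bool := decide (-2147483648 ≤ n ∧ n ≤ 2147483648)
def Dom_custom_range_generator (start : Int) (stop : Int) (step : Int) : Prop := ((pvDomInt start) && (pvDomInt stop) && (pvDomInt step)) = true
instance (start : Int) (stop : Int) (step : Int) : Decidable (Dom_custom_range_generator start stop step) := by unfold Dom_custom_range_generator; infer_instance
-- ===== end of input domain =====

-- B replaces A's two direction-specific while loops by a precomputed ceiling-division count and one index loop (alternative decomposition, same cost).
-- Pre_ excludes exactly the inputs on which the Python generator raises ValueError (step == 0, or direction mismatch).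


-- ===== PORT A =====
-- A's first while loop ('while value < stop: yield value; value += step').
-- The '0 < step' guard only makes the recursion total; A only reaches this loop when 0 < step.
def pvLoopUp (value stop step : Int) : List Int :=
  if _h : value < stop ∧ 0 < step then value :: pvLoopUp (value + step) stop step else []
termination_by (stop - value).toNat
decreasing_by omega

-- A's second while loop ('while value > stop: …'); 'step < 0' guard for totality only.
def pvLoopDown (value stop step : Int) : List Int :=
  if _h : stop < value ∧ step < 0 then value :: pvLoopDown (value + step) stop step else []
termination_by (value - stop).toNat
decreasing_by omega

def custom_range_generator (start : Int) (stop : Int) (step : Int) : List Int :=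
  if step = 0 then []                                         -- Python: raise ValueError (outside Pre_)
  else if start < stop ∧ 0 < step then pvLoopUp start stop step
  else if stop < start ∧ step < 0 then pvLoopDown start stop step
  else []                                                     -- Python: raise ValueError (outside Pre_)

-- ===== PORT B =====
def custom_range_generator_alt (start : Int) (stop : Int) (step : Int) : List Int :=
  if step = 0 then []                                         -- Python: raise ValueError (outside Pre_)
  else if ¬ ((start < stop ∧ 0 < step) ∨ (stop < start ∧ step < 0)) then []  -- Python: raise (outside Pre_)
  else
    let n : Int := -(PySem.Int.floordiv (start - stop) step)
    (List.range n.toNat).map (fun (i : Nat) => start + step * (i : Int))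

-- ===== PRECONDITION & SPEC =====
-- Pre_ excludes exactly the inputs on which the Python A raises ValueError and yields nothing.
def Pre_custom_range_generator (start : Int) (stop : Int) (step : Int) : Prop :=
  (start < stop ∧ 0 < step) ∨ (stop < start ∧ step < 0)
instance (start : Int) (stop : Int) (step : Int) : Decidable (Pre_custom_range_generator start stop step) := by
  unfold Pre_custom_range_generator; infer_instance

def pvWitness_custom_range_generator : Int × Int × Int := (0, 7, 2)

def Spec_custom_range_generator (start : Int) (stop : Int) (step : Int) (out : List Int) : Prop :=
  out = custom_range_generator_alt start stop step
instance (start : Int) (stop : Int) (step : Int) (out : List Int) : Decidable (Spec_custom_range_generator start stop step out) := by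
  unfold Spec_custom_range_generator; infer_instance

-- ===== CLAIM (what is proved, stated in full; the proofs are below) =====
def Claim_equal_custom_range_generator : Prop := ∀ (start : Int) (stop : Int) (step : Int), Dom_custom_range_generator start stop step → Pre_custom_range_generator start stop step → Spec_custom_range_generator start stop step (custom_range_generator start stop step)


-- ===== LEMMAS AND PROOFS =====

-- The ascending loop equals the indexed map with the ceiling-division count.
theorem pvLoopUp_eq (stopv step : Int) (hstep : 0 < step) :
    ∀ (k : Nat) (start : Int), (stopv - start).toNat ≤ k →
      pvLoopUp start stopv step =
        (List.range (-(PySem.Int.floordiv (start - stopv) step)).toNat).map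
          (fun (i : Nat) => start + step * (i : Int)) := by
  intro k
  induction k with
  | zero =>
      intro start hk
      rw [pvLoopUp, dif_neg (by omega : ¬ (start < stopv ∧ 0 < step))]
      have hq : (0:Int) ≤ PySem.Int.floordiv (start - stopv) step := by
        rw [PySem.Int.le_floordiv_iff_mul_le hstep, zero_mul]
        omega
      have hz : (-(PySem.Int.floordiv (start - stopv) step)).toNat = 0 := by omega
      simp [hz]
  | succ k ih =>
      intro start hk
      rw [pvLoopUp]
      by_cases hlt : start < stopv
      · rw [dif_pos ⟨hlt, hstep⟩]
        set q := PySem.Int.floordiv (start - stopv) step with hqdef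
        have hq : q * step ≤ start - stopv ∧ start - stopv < (q + 1) * step := by
          rw [← PySem.Int.floordiv_eq_iff_of_pos hstep]
        have hqneg : q < 0 := by nlinarith [hq.1, hq.2]
        have hnext : PySem.Int.floordiv (start + step - stopv) step = q + 1 := by
          rw [PySem.Int.floordiv_eq_iff_of_pos hstep]
          constructor
          · nlinarith [hq.1]
          · nlinarith [hq.2]
        rw [ih (start + step) (by omega),
            show start + step - stopv = (start + step) - stopv from rfl] at *
        rw [hnext]
        have hm : (-q).toNat = (-(q + 1)).toNat + 1 := by omega
        rw [hm, List.range_succ_eq_map, List.map_cons, List.map_map]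
        congr 1
        · norm_num
        · apply List.map_congr_left
          intro i _
          simp only [Function.comp, Nat.succ_eq_add_one]
          push_cast
          ring
      · rw [dif_neg (by omega : ¬ (start < stopv ∧ 0 < step))]
        have hq : (0:Int) ≤ PySem.Int.floordiv (start - stopv) step := by
          rw [PySem.Int.le_floordiv_iff_mul_le hstep, zero_mul]
          omega
        have hz : (-(PySem.Int.floordiv (start - stopv) step)).toNat = 0 := by omega
        simp [hz]

-- The descending loop is the pointwise negation of the ascending loop on the negated input.
theorem pvLoopDown_eq_neg (stopv step : Int) :
    ∀ (k : Nat) (value : Int), (value - stopv).toNat ≤ k →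
      pvLoopDown value stopv step =
        (pvLoopUp (-value) (-stopv) (-step)).map (fun x => -x) := by
  intro k
  induction k with
  | zero =>
      intro value hk
      rw [pvLoopDown, pvLoopUp,
          dif_neg (by omega : ¬ (stopv < value ∧ step < 0)),
          dif_neg (by omega : ¬ (-value < -stopv ∧ 0 < -step))]
      simp
  | succ k ih =>
      intro value hk
      rw [pvLoopDown, pvLoopUp]
      by_cases h : stopv < value ∧ step < 0
      · rw [dif_pos h, dif_pos (by omega : -value < -stopv ∧ 0 < -step)]
        simp only [List.map_cons, neg_neg]
        rw [ih (value + step) (by omega), neg_add]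
      · rw [dif_neg h, dif_neg (by omega : ¬ (-value < -stopv ∧ 0 < -step))]
        simp

-- ===== VERDICT (by name: the statement is the Claim_ definition above) =====
theorem custom_range_generator_spec : Claim_equal_custom_range_generator := by
  intro start stopv step _ hpre
  unfold Spec_custom_range_generator custom_range_generator custom_range_generator_alt
  rcases hpre with ⟨h1, h2⟩ | ⟨h1, h2⟩
  · rw [if_neg (by omega : ¬ step = 0), if_pos ⟨h1, h2⟩,
        if_neg (by omega : ¬ step = 0),
        if_neg (not_not_intro (Or.inl ⟨h1, h2⟩))]
    exact pvLoopUp_eq stopv step h2 (stopv - start).toNat start le_rfl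
  · rw [if_neg (by omega : ¬ step = 0),
        if_neg (by omega : ¬ (start < stopv ∧ 0 < step)), if_pos ⟨h1, h2⟩,
        if_neg (by omega : ¬ step = 0),
        if_neg (not_not_intro (Or.inr ⟨h1, h2⟩))]
    rw [pvLoopDown_eq_neg stopv step (start - stopv).toNat start le_rfl,
        pvLoopUp_eq (-stopv) (-step) (by omega) ((-stopv) - (-start)).toNat (-start) le_rfl,
        show (-start) - (-stopv) = -(start - stopv) from by ring,
        PySem.Int.floordiv_neg_neg]
    rw [List.map_map]
    apply List.map_congr_left
    intro i _
    simp only [Function.comp]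
    ring
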